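-- pv_equiv track=rewrite | github.com/SuperMartinYang/learning_algorithm | leetcode/medium/from_1st_row_to_lst_row.py | from_1st_row_to_lst_row
-- ===== SOURCE A (Python) =====
-- def from_1st_row_to_lst_row(grid):
--     # DFS with memo
--     rows = len(grid)
--     cols = len(grid[0]) if rows else 0
--     # get starting points here
--     visited = set()    # i, j in set means visited
--     d = ((1, 0), (0, 1), (-1, 0), (0, -1))
--     def dfs(r, c):
--         if r < 0 or r >= rows or c < 0 or c > cols or grid[r][c] != 1 or (r, c) in visited:
--             return False
--         if r == rows - 1: return True
--         visited.add((r, c))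
--         for p in d:
--             if dfs(r + p[0], c + p[1]):
--                 return True
--         # visited.remove((r, c))
--         return False
--
--     for i in range(cols):
--         if grid[0][i] == 1:
--             # dfs
--             if dfs(0, i):
--                 return True
--     return False
-- ===== SOURCE B (Python) =====
-- def from_1st_row_to_lst_row(grid):
--     # Iterative worklist version: all top-row starts pushed once, one explicit
--     # stack, neighbours pushed in reverse so pop order follows the DFS; the
--     # column guard is the natural c >= cols bound.
--     rows = len(grid)
--     cols = len(grid[0]) if rows else 0
--     visited = set()
--     stack = [(0, i) for i in range(cols - 1, -1, -1)]
--     while stack: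
--         r, c = stack.pop()
--         if r < 0 or r >= rows or c < 0 or c >= cols or grid[r][c] != 1 or (r, c) in visited:
--             continue
--         if r == rows - 1:
--             return True
--         visited.add((r, c))
--         stack.extend([(r, c - 1), (r - 1, c), (r, c + 1), (r + 1, c)])
--     return False
-- ===== Notes on version B (the rewrite author's own statement) =====
-- stated objective: alternative
-- what changed: A's recursive closure DFS (with an inner dfs function and Python call stack) is replaced by an iterative worklist loop over one explicit stack: all top-row starts are pushed once, neighbours are pushed in reverse so pop order follows the recursion, and the column guard is the natural c >= cols instead of A's off-by-one c > cols.
-- outside the precondition, e.g. on from_1st_row_to_lst_row([[0, 1], [0, 1, 1], [0, 0, 1]]): A returns True, B returns False; on from_1st_row_to_lst_row([[1], [1]]): A returns True, B returns True; on from_1st_row_to_lst_row([[0, 1], [0, 1]]): A returns True, B returns True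
import Mathlib
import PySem

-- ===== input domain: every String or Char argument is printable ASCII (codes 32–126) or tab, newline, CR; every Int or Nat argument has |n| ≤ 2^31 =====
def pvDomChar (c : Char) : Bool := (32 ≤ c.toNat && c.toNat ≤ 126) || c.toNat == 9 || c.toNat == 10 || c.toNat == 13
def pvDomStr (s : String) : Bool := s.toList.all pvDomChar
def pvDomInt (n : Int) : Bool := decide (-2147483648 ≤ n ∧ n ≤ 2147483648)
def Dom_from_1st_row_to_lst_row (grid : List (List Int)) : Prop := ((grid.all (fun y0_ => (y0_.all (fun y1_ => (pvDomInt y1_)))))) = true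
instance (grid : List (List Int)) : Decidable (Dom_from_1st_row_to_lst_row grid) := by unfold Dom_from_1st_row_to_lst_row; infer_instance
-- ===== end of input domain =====

-- B replaces A's recursive closure DFS by an iterative worklist loop over an explicit stack
-- (alternative decomposition, same asymptotic cost; B uses the natural c >= cols column guard).

-- ===== PORT A =====
-- grid[r][c] as the Python reads it (Python's guards ensure the read is in range wherever
-- it is reached inside Pre_; the port is total, with out-of-range reads giving 0)
def pvCell (grid : List (List Int)) (r c : Int) : Int :=
  PySem.List.pyGetD ((PySem.List.pyGet? grid r).getD []) c 0

-- A's guard, literally: r < 0 or r >= rows or c < 0 or c > cols or grid[r][c] != 1 or (r,c) in visited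
def pvGuardA (grid : List (List Int)) (rows cols : Int) (v : PySem.Set (Int × Int)) (r c : Int) : Bool :=
  decide (r < 0) || decide (rows ≤ r) || decide (c < 0) || decide (cols < c) ||
    (pvCell grid r c != 1) || PySem.Set.contains v (r, c)

-- A's dfs; the fuel only makes the recursion structural (recursion depth is at most
-- #cells + 1, so the fuel chosen below never runs out); returns (result, visited)
-- because the Python closure mutates the shared visited set.
def pvA_dfs (grid : List (List Int)) (rows cols : Int) :
    Nat → PySem.Set (Int × Int) → Int → Int → Bool × PySem.Set (Int × Int)
  | 0, v, _, _ => (false, v)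
  | f + 1, v, r, c =>
    if pvGuardA grid rows cols v r c then (false, v)
    else if r = rows - 1 then (true, v)
    else
      -- for p in ((1,0),(0,1),(-1,0),(0,-1)): early return on True
      let p1 := pvA_dfs grid rows cols f (PySem.Set.add v (r, c)) (r + 1) c
      if p1.1 then p1 else
      let p2 := pvA_dfs grid rows cols f p1.2 r (c + 1)
      if p2.1 then p2 else
      let p3 := pvA_dfs grid rows cols f p2.2 (r - 1) c
      if p3.1 then p3 else
      pvA_dfs grid rows cols f p3.2 r (c - 1)

-- the trailing loop: for i in range(cols): if grid[0][i] == 1 and dfs(0, i): return True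
def pvA_starts (grid : List (List Int)) (rows cols : Int) (fuel : Nat) :
    PySem.Set (Int × Int) → List Int → Bool
  | _, [] => false
  | v, i :: is =>
    if pvCell grid 0 i = 1 then
      let p := pvA_dfs grid rows cols fuel v 0 i
      if p.1 then true else pvA_starts grid rows cols fuel p.2 is
    else pvA_starts grid rows cols fuel v is

def from_1st_row_to_lst_row (grid : List (List Int)) : Bool :=
  let rows : Int := grid.length
  let cols : Int := if grid.length ≠ 0 then (((PySem.List.pyGet? grid 0).getD []).length : Int) else 0
  pvA_starts grid rows cols (grid.length * ((PySem.List.pyGet? grid 0).getD []).length + 1)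
    PySem.Set.empty (PySem.List.pyRange 0 cols 1)

-- ===== PORT B =====
-- B's guard: the natural c >= cols bound instead of A's c > cols
def pvGuardB (grid : List (List Int)) (rows cols : Int) (v : PySem.Set (Int × Int)) (r c : Int) : Bool :=
  decide (r < 0) || decide (rows ≤ r) || decide (c < 0) || decide (cols ≤ c) ||
    (pvCell grid r c != 1) || PySem.Set.contains v (r, c)

-- all in-bounds cells, for the termination measure of the worklist loop
def pvAllCells (rows cols : Int) : List (Int × Int) :=
  (PySem.List.pyRange 0 rows 1).flatMap (fun r => (PySem.List.pyRange 0 cols 1).map (fun c => (r, c)))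

def pvMeasure (rows cols : Int) (v : List (Int × Int)) : Nat :=
  ((pvAllCells rows cols).toFinset \ v.toFinset).card

-- cited by pvB_machine's termination proof
theorem pvMem_allCells (rows cols : Int) (p : Int × Int) :
    p ∈ pvAllCells rows cols ↔ 0 ≤ p.1 ∧ p.1 < rows ∧ 0 ≤ p.2 ∧ p.2 < cols := by
  cases p with
  | mk a b => simp [pvAllCells, List.mem_flatMap, PySem.List.mem_pyRange_one]; tauto

-- cited by pvB_machine's termination proof: marking a fresh in-bounds cell shrinks the measure
theorem pvMeasure_add_lt (rows cols : Int) (v : PySem.Set (Int × Int)) (r c : Int)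
    (h1 : 0 ≤ r) (h2 : r < rows) (h3 : 0 ≤ c) (h4 : c < cols)
    (h5 : ¬ (r, c) ∈ v) :
    pvMeasure rows cols (PySem.Set.add v (r, c)) < pvMeasure rows cols v := by
  have hadd : PySem.Set.add v (r, c) = v ++ [(r, c)] := by
    simp [PySem.Set.add, PySem.Set.contains, List.contains_eq_mem, h5]
  rw [hadd]; unfold pvMeasure
  apply Finset.card_lt_card
  constructor
  · intro x hx
    simp only [List.toFinset_append, Finset.mem_sdiff, Finset.mem_union, List.mem_toFinset] at hx ⊢
    tauto
  · intro hsub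
    have hmem : (r, c) ∈ (pvAllCells rows cols).toFinset \ v.toFinset := by
      simp only [Finset.mem_sdiff, List.mem_toFinset]
      exact ⟨(pvMem_allCells rows cols (r, c)).2 ⟨h1, h2, h3, h4⟩, h5⟩
    have := hsub hmem
    simp only [List.toFinset_append, Finset.mem_sdiff, Finset.mem_union, List.mem_toFinset] at this
    simp at this

-- B's while loop; the stack is modeled head-as-top (Python pops from the list's end,
-- and extends with the four neighbours reversed, so (r+1,c) is popped first)
def pvB_machine (grid : List (List Int)) (rows cols : Int) :
    PySem.Set (Int × Int) → List (Int × Int) → Bool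
  | _, [] => false
  | v, (r, c) :: s =>
    if pvGuardB grid rows cols v r c then pvB_machine grid rows cols v s
    else if r = rows - 1 then true
    else pvB_machine grid rows cols (PySem.Set.add v (r, c))
      ((r + 1, c) :: (r, c + 1) :: (r - 1, c) :: (r, c - 1) :: s)
  termination_by v s => (pvMeasure rows cols v, s.length)
  decreasing_by
  · exact Prod.Lex.right _ (by simp)
  · apply Prod.Lex.left
    rename_i hg _
    simp only [pvGuardB, Bool.or_eq_true, decide_eq_true_eq, bne_iff_ne, ne_eq,
      PySem.Set.contains, List.contains_eq_mem, not_or, not_not, Int.not_lt, Int.not_le] at hg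
    have h1 := hg.1.1.1.1.1
    have h2 := hg.1.1.1.1.2
    have h3 := hg.1.1.1.2
    have h4 := hg.1.1.2
    exact pvMeasure_add_lt rows cols v r c (by omega) (by omega) (by omega) (by omega) hg.2

def from_1st_row_to_lst_row_alt (grid : List (List Int)) : Bool :=
  let rows : Int := grid.length
  let cols : Int := if grid.length ≠ 0 then (((PySem.List.pyGet? grid 0).getD []).length : Int) else 0
  pvB_machine grid rows cols PySem.Set.empty
    (((PySem.List.pyRange (cols - 1) (-1) (-1)).map (fun i => ((0 : Int), i))).reverse)

-- ===== PRECONDITION & SPEC =====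
-- Pre_ excludes grids whose top row contains a 1 and which are ragged or have a 1 in a
-- non-bottom cell of the last column: on those A's off-by-one column guard (c > cols)
-- reads grid[r][cols] and raises IndexError on many of them, and on the rest A's value
-- depends on reads past the nominal column count.
def Pre_from_1st_row_to_lst_row (grid : List (List Int)) : Prop :=
  (∀ x ∈ grid.headD [], x ≠ 1) ∨
  ((∀ row ∈ grid, row.length = (grid.headD []).length) ∧
   ∀ row ∈ grid.dropLast, row.getLast?.getD 0 ≠ 1)
instance (grid : List (List Int)) : Decidable (Pre_from_1st_row_to_lst_row grid) := by
  unfold Pre_from_1st_row_to_lst_row; infer_instance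

def pvWitness_from_1st_row_to_lst_row : List (List Int) := [[1, 0], [1, 0]]

def Spec_from_1st_row_to_lst_row (grid : List (List Int)) (out : Bool) : Prop := out = from_1st_row_to_lst_row_alt grid
instance (grid : List (List Int)) (out : Bool) : Decidable (Spec_from_1st_row_to_lst_row grid out) := by unfold Spec_from_1st_row_to_lst_row; infer_instance

-- ===== CLAIM (what is proved, stated in full; the proofs are below) =====
def Claim_equal_from_1st_row_to_lst_row : Prop := ∀ (grid : List (List Int)), Dom_from_1st_row_to_lst_row grid → Pre_from_1st_row_to_lst_row grid → Spec_from_1st_row_to_lst_row grid (from_1st_row_to_lst_row grid)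

-- ===== LEMMAS AND PROOFS =====

theorem pvMachine_nil (grid : List (List Int)) (rows cols : Int) (v : PySem.Set (Int × Int)) :
    pvB_machine grid rows cols v [] = false := by rw [pvB_machine]

theorem pvMachine_cons (grid : List (List Int)) (rows cols : Int) (v : PySem.Set (Int × Int))
    (r c : Int) (s : List (Int × Int)) :
    pvB_machine grid rows cols v ((r, c) :: s) =
      if pvGuardB grid rows cols v r c then pvB_machine grid rows cols v s
      else if r = rows - 1 then true
      else pvB_machine grid rows cols (PySem.Set.add v (r, c))
        ((r + 1, c) :: (r, c + 1) :: (r - 1, c) :: (r, c - 1) :: s) := by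
  rw [pvB_machine]

theorem pvSubset_add (v : PySem.Set (Int × Int)) (x : Int × Int) : v ⊆ PySem.Set.add v x := by
  unfold PySem.Set.add
  split
  · exact fun a h => h
  · exact List.subset_append_left v [x]

theorem pvA_dfs_mono (grid : List (List Int)) (rows cols : Int) :
    ∀ (f : Nat) (v : PySem.Set (Int × Int)) (r c : Int),
      v ⊆ (pvA_dfs grid rows cols f v r c).2 := by
  intro f
  induction f with
  | zero => intro v r c; simp [pvA_dfs]
  | succ f ih =>
    intro v r c
    simp only [pvA_dfs]
    by_cases hg : pvGuardA grid rows cols v r c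
    · simp [hg]
    · simp only [hg, if_false, Bool.false_eq_true]
      by_cases hr : r = rows - 1
      · simp [hr]
      · simp only [hr, if_false]
        have t0 : v ⊆ PySem.Set.add v (r, c) := pvSubset_add v (r, c)
        have t1 := ih (PySem.Set.add v (r, c)) (r + 1) c
        set p1 := pvA_dfs grid rows cols f (PySem.Set.add v (r, c)) (r + 1) c with hp1
        by_cases h1 : p1.1
        · simp only [h1, if_true]; exact t0.trans t1
        · simp only [h1, if_false, Bool.false_eq_true]
          have t2 := ih p1.2 r (c + 1)
          set p2 := pvA_dfs grid rows cols f p1.2 r (c + 1) with hp2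
          by_cases h2 : p2.1
          · simp only [h2, if_true]; exact ((t0.trans t1).trans t2)
          · simp only [h2, if_false, Bool.false_eq_true]
            have t3 := ih p2.2 (r - 1) c
            set p3 := pvA_dfs grid rows cols f p2.2 (r - 1) c with hp3
            by_cases h3 : p3.1
            · simp only [h3, if_true]; exact (((t0.trans t1).trans t2).trans t3)
            · simp only [h3, if_false, Bool.false_eq_true]
              have t4 := ih p3.2 r (c - 1)
              exact ((((t0.trans t1).trans t2).trans t3).trans t4)

theorem pvMeasure_mono (rows cols : Int) (v w : List (Int × Int)) (h : v ⊆ w) :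
    pvMeasure rows cols w ≤ pvMeasure rows cols v := by
  apply Finset.card_le_card
  apply Finset.sdiff_subset_sdiff (Finset.Subset.refl _)
  intro x hx
  simp only [List.mem_toFinset] at hx ⊢
  exact h hx

-- with a rectangular grid, any read at column >= cols gives 0
theorem pvCell_ge_cols (grid : List (List Int)) (cols : Int)
    (hrect : ∀ row ∈ grid, (row.length : Int) = cols) (r c : Int)
    (h1 : 0 ≤ r) (h2 : r < (grid.length : Int)) (hc : cols ≤ c) :
    pvCell grid r c = 0 := by
  have hr : r.toNat < grid.length := by omega
  have hget : PySem.List.pyGet? grid r = some grid[r.toNat] := by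
    rw [PySem.List.pyGet?_of_nonneg grid h1]
    exact List.getElem?_eq_getElem hr
  have hlen : ((grid[r.toNat]).length : Int) = cols := hrect _ (List.getElem_mem hr)
  unfold pvCell
  rw [hget]
  simp only [Option.getD_some]
  have hnone : PySem.List.pyGet? grid[r.toNat] c = none := by
    rw [PySem.List.pyGet?_eq_none_iff]
    unfold PySem.Raise.InRange
    omega
  simp [PySem.List.pyGetD, hnone]

-- under rectangularity A's off-by-one guard and B's natural guard agree
theorem pvGuard_eq (grid : List (List Int)) (cols : Int)
    (hrect : ∀ row ∈ grid, (row.length : Int) = cols)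
    (v : PySem.Set (Int × Int)) (r c : Int) :
    pvGuardA grid (grid.length) cols v r c = pvGuardB grid (grid.length) cols v r c := by
  unfold pvGuardA pvGuardB
  by_cases h1 : r < 0
  · simp [h1]
  by_cases h2 : (grid.length : Int) ≤ r
  · simp [h2]
  by_cases h3 : c < 0
  · simp [h3]
  by_cases h4 : c < cols
  · simp [show ¬ cols < c by omega, show ¬ cols ≤ c by omega]
  · have hcell : pvCell grid r c = 0 := pvCell_ge_cols grid cols hrect r c (by omega) (by omega) (by omega)
    simp [hcell, show cols ≤ c by omega]

theorem pvMeasure_le (rows cols : Int) (v : List (Int × Int)) :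
    pvMeasure rows cols v ≤ rows.toNat * cols.toNat := by
  calc pvMeasure rows cols v ≤ (pvAllCells rows cols).toFinset.card :=
        Finset.card_le_card (Finset.sdiff_subset)
    _ ≤ (pvAllCells rows cols).length := List.toFinset_card_le _
    _ = rows.toNat * cols.toNat := by
        simp [pvAllCells, List.length_flatMap, PySem.List.length_pyRange_one,
          List.map_const']

-- the simulation: one recursive dfs call behaves like the machine with that cell on top
theorem pvSim (grid : List (List Int)) (cols : Int)
    (hrect : ∀ row ∈ grid, (row.length : Int) = cols) :
    ∀ (f : Nat) (v : PySem.Set (Int × Int)) (r c : Int) (s : List (Int × Int)),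
      pvMeasure (grid.length) cols v < f →
      pvB_machine grid (grid.length) cols v ((r, c) :: s) =
        (if (pvA_dfs grid (grid.length) cols f v r c).1 then true
         else pvB_machine grid (grid.length) cols (pvA_dfs grid (grid.length) cols f v r c).2 s) := by
  intro f
  induction f with
  | zero => intro v r c s h; omega
  | succ f ih =>
    intro v r c s hf
    rw [pvMachine_cons, ← pvGuard_eq grid cols hrect]
    by_cases hg : pvGuardA grid (grid.length) cols v r c
    · simp [pvA_dfs, hg]
    · simp only [pvA_dfs, hg, if_false, Bool.false_eq_true]
      by_cases hr : r = (grid.length : Int) - 1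
      · simp [hr]
      · simp only [hr, if_false]
        -- facts from the failed guard
        have hgp : 0 ≤ r ∧ r < (grid.length : Int) ∧ 0 ≤ c ∧ c ≤ cols ∧
            pvCell grid r c = 1 ∧ ¬ (r, c) ∈ v := by
          simp only [pvGuardA, Bool.or_eq_true, decide_eq_true_eq, bne_iff_ne, ne_eq,
            PySem.Set.contains, List.contains_eq_mem, not_or, not_not, Int.not_lt, Int.not_le] at hg
          exact ⟨hg.1.1.1.1.1, hg.1.1.1.1.2, hg.1.1.1.2, hg.1.1.2, hg.1.2, hg.2⟩
        have hcc : c < cols := by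
          rcases lt_or_eq_of_le hgp.2.2.2.1 with h | h
          · exact h
          · exfalso
            have := pvCell_ge_cols grid cols hrect r c hgp.1 hgp.2.1 (le_of_eq h.symm)
            rw [hgp.2.2.2.2.1] at this
            exact one_ne_zero this
        have hlt : pvMeasure (grid.length) cols (PySem.Set.add v (r, c)) < pvMeasure (grid.length) cols v :=
          pvMeasure_add_lt _ _ v r c hgp.1 hgp.2.1 hgp.2.2.1 hcc hgp.2.2.2.2.2
        set v0 := PySem.Set.add v (r, c) with hv0
        have hm0 : pvMeasure (grid.length) cols v0 < f := by omega
        rw [ih v0 (r + 1) c _ hm0]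
        set p1 := pvA_dfs grid (grid.length) cols f v0 (r + 1) c with hp1d
        have hmono1 : v0 ⊆ p1.2 := pvA_dfs_mono grid _ cols f v0 (r + 1) c
        have hm1 : pvMeasure (grid.length) cols p1.2 < f :=
          lt_of_le_of_lt (pvMeasure_mono _ _ _ _ hmono1) hm0
        by_cases h1 : p1.1
        · simp [h1]
        · simp only [h1, if_false, Bool.false_eq_true]
          rw [ih p1.2 r (c + 1) _ hm1]
          set p2 := pvA_dfs grid (grid.length) cols f p1.2 r (c + 1) with hp2d
          have hmono2 : p1.2 ⊆ p2.2 := pvA_dfs_mono grid _ cols f p1.2 r (c + 1)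
          have hm2 : pvMeasure (grid.length) cols p2.2 < f :=
            lt_of_le_of_lt (pvMeasure_mono _ _ _ _ hmono2) hm1
          by_cases h2 : p2.1
          · simp [h2]
          · simp only [h2, if_false, Bool.false_eq_true]
            rw [ih p2.2 (r - 1) c _ hm2]
            set p3 := pvA_dfs grid (grid.length) cols f p2.2 (r - 1) c with hp3d
            have hmono3 : p2.2 ⊆ p3.2 := pvA_dfs_mono grid _ cols f p2.2 (r - 1) c
            have hm3 : pvMeasure (grid.length) cols p3.2 < f :=
              lt_of_le_of_lt (pvMeasure_mono _ _ _ _ hmono3) hm2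
            by_cases h3 : p3.1
            · simp [h3]
            · simp only [h3, if_false, Bool.false_eq_true]
              rw [ih p3.2 r (c - 1) _ hm3]

-- the machine on the start stack is A's start loop
theorem pvStarts_eq (grid : List (List Int)) (cols : Int)
    (hrect : ∀ row ∈ grid, (row.length : Int) = cols) (F : Nat)
    (hF : ∀ v : PySem.Set (Int × Int), pvMeasure (grid.length) cols v < F) :
    ∀ (is : List Int) (v : PySem.Set (Int × Int)),
      pvB_machine grid (grid.length) cols v (is.map (fun i => ((0 : Int), i))) =
        pvA_starts grid (grid.length) cols F v is := by
  intro is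
  induction is with
  | nil => intro v; simp [pvA_starts, pvMachine_nil]
  | cons i is ih =>
    intro v
    simp only [List.map_cons]
    rw [pvSim grid cols hrect F v 0 i _ (hF v)]
    by_cases hcell : pvCell grid 0 i = 1
    · simp only [pvA_starts, if_pos hcell]
      by_cases hp : (pvA_dfs grid (grid.length) cols F v 0 i).1
      · simp [hp]
      · simp [hp, ih]
    · have hF1 : 0 < F := lt_of_le_of_lt (Nat.zero_le _) (hF v)
      obtain ⟨f, rfl⟩ : ∃ f, F = f + 1 := ⟨F - 1, by omega⟩
      have hdfs : pvA_dfs grid (grid.length) cols (f + 1) v 0 i = (false, v) := by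
        simp only [pvA_dfs]
        rw [if_pos]
        simp [pvGuardA, bne_iff_ne, hcell]
      simp [hdfs, pvA_starts, hcell, ih]

-- skip lemmas for the "no 1 in the top row" case
theorem pvMachine_skip (grid : List (List Int)) (rows cols : Int) :
    ∀ (s : List (Int × Int)) (v : PySem.Set (Int × Int)),
      (∀ p ∈ s, pvGuardB grid rows cols v p.1 p.2 = true) →
      pvB_machine grid rows cols v s = false := by
  intro s
  induction s with
  | nil => intro v _; exact pvMachine_nil grid rows cols v
  | cons p s ih =>
    intro v h
    obtain ⟨r, c⟩ := p
    rw [pvMachine_cons, if_pos (h (r, c) (List.mem_cons_self))]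
    exact ih v (fun q hq => h q (List.mem_cons_of_mem _ hq))

theorem pvStarts_skip (grid : List (List Int)) (rows cols : Int) (fuel : Nat) :
    ∀ (is : List Int) (v : PySem.Set (Int × Int)),
      (∀ i ∈ is, pvCell grid 0 i ≠ 1) →
      pvA_starts grid rows cols fuel v is = false := by
  intro is
  induction is with
  | nil => intro v _; rfl
  | cons i is ih =>
    intro v h
    simp only [pvA_starts, if_neg (h i (List.mem_cons_self))]
    exact ih v (fun j hj => h j (List.mem_cons_of_mem _ hj))

-- every top-row read misses 1 when the top row has no 1
theorem pvCell_top (row0 : List Int) (rest : List (List Int))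
    (h : ∀ x ∈ row0, x ≠ 1) (i : Int) : pvCell (row0 :: rest) 0 i ≠ 1 := by
  unfold pvCell
  rw [PySem.List.pyGet?_zero_cons]
  simp only [Option.getD_some]
  unfold PySem.List.pyGetD
  cases hg : PySem.List.pyGet? row0 i with
  | none => simp
  | some x =>
    simp only [Option.getD_some]
    exact h x (PySem.List.mem_of_pyGet?_eq_some row0 hg)

-- rewrite B's initial stack to the forward range
theorem pvStack_init (cols : Int) :
    ((PySem.List.pyRange (cols - 1) (-1) (-1)).map (fun i => ((0 : Int), i))).reverse =
      (PySem.List.pyRange 0 cols 1).map (fun i => ((0 : Int), i)) := by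
  rw [PySem.List.pyRange_neg_one_eq_reverse]
  have : cols - 1 + 1 = cols := by ring
  rw [show (-1 : Int) + 1 = 0 by ring, this, List.map_reverse, List.reverse_reverse]

-- ===== VERDICT (by name: the statement is the Claim_ definition above) =====
theorem from_1st_row_to_lst_row_spec : Claim_equal_from_1st_row_to_lst_row := by
  intro grid _ hpre
  unfold Spec_from_1st_row_to_lst_row
  cases grid with
  | nil =>
    simp [from_1st_row_to_lst_row, from_1st_row_to_lst_row_alt,
      PySem.List.pyRange_one_eq_nil, PySem.List.pyRange_neg_one_eq_nil,
      pvA_starts, pvMachine_nil]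
  | cons row0 rest =>
    set grid := row0 :: rest with hgrid
    have hlen : grid.length ≠ 0 := by simp [hgrid]
    have hget : (PySem.List.pyGet? grid 0).getD [] = row0 := by
      rw [hgrid, PySem.List.pyGet?_zero_cons]; rfl
    simp only [from_1st_row_to_lst_row, from_1st_row_to_lst_row_alt, if_pos hlen, hget,
      pvStack_init]
    rcases hpre with h1 | ⟨hrect, _⟩
    · -- no 1 in the top row: both sides return False
      rw [hgrid] at h1
      simp only [List.headD_cons] at h1
      rw [pvStarts_skip _ _ _ _ _ _ (fun i _ => by rw [hgrid]; exact pvCell_top row0 rest h1 i)]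
      rw [pvMachine_skip _ _ _ _ _ (fun p hp => ?_)]
      obtain ⟨i, _, rfl⟩ := List.mem_map.1 hp
      have := pvCell_top row0 rest h1 i
      rw [← hgrid] at this
      simp [pvGuardB, bne_iff_ne, this]
    · -- rectangular with no 1 in a non-bottom last-column cell
      have hrect' : ∀ row ∈ grid, ((row.length : Int)) = ((row0.length : Int)) := by
        intro row hrow
        have := hrect row hrow
        rw [hgrid] at this
        simp only [List.headD_cons] at this
        exact_mod_cast this
      rw [pvStarts_eq grid ((row0.length : Int)) hrect'
        (grid.length * row0.length + 1) (fun v => by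
          have := pvMeasure_le (grid.length) ((row0.length : Int)) v
          simp only [Int.toNat_natCast] at this
          omega)]
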